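-- pv_equiv track=rewrite | github.com/cogito30/py_coding_test | programmers/Lv1/133499.py | solution
-- ===== SOURCE A (Python) =====
-- def solution(babbling):
--     answer = 0
--     available_words = ["aya", "ye", "woo", "ma"]
--     for babble in babbling:
--         prev_word = []
--         word = ""
--         for i in babble:
--             word += i
--             if word in available_words:
--                 prev_word.append(word)
--                 word = ""
--         for i in range(1, len(prev_word)):
--             if prev_word[i-1] == prev_word[i]:
--                 word = "a" # 카운트 방지
--         if word == "" :
--             answer += 1
--
--     return answer
-- ===== SOURCE B (Python) =====
-- WORDS = ("aya", "ye", "woo", "ma")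
--
-- def _valid(b):
--     tokens = []
--     i = 0
--     while i < len(b):
--         for w in WORDS:
--             if b.startswith(w, i):
--                 tokens.append(w)
--                 i += len(w)
--                 break
--         else:
--             return False
--     return all(x != y for x, y in zip(tokens, tokens[1:]))
--
-- def solution(babbling):
--     return sum(1 for b in babbling if _valid(b))
-- ===== Notes on version B (the rewrite author's own statement) =====
-- stated objective: simpler
-- what changed: Replaces A's char-by-char accumulator with leftover-word flag hack by a chunk-wise startswith tokenizer that jumps by whole words with early failure, plus a zip-based adjacent-duplicate check.
import Mathlib
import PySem

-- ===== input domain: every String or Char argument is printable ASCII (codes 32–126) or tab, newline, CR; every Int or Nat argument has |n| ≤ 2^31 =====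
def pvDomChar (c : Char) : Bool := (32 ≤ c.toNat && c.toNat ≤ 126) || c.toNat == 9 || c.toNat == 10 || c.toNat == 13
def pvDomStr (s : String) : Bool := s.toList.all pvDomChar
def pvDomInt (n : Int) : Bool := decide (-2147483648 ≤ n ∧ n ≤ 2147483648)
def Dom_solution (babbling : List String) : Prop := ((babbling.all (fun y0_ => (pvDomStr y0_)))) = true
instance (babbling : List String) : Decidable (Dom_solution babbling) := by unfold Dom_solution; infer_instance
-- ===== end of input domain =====

-- B replaces A's char-by-char accumulator (and its word="a" flag hack) by a chunk-wise
-- startswith tokenizer with early failure and a zip-based adjacency check; objective: simpler.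

-- ===== PORT A =====
-- available_words of A
def pvWordsA : List (List Char) := [['a','y','a'], ['y','e'], ['w','o','o'], ['m','a']]

-- one step of A's inner character loop: word += i; if word in available_words: append, reset
def pvStepA (st : List (List Char) × List Char) (c : Char) : List (List Char) × List Char :=
  let w := st.2 ++ [c]
  if w ∈ pvWordsA then (st.1 ++ [w], []) else (st.1, w)

def solution (babbling : List String) : Int :=
  babbling.foldl (fun answer babble =>
    let st := babble.toList.foldl pvStepA ([], [])
    let word := (PySem.List.pyRange 1 (st.1.length : Int) 1).foldl
      (fun w i => if PySem.List.pyGetD st.1 (i-1) [] = PySem.List.pyGetD st.1 i [] then ['a'] else w)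
      st.2
    if word = [] then answer + 1 else answer) 0

-- ===== PORT B =====
-- B's while loop: at position i try each word as a prefix (startswith), jump by its length;
-- recursion on the remaining characters replaces the index i.
def pvTokB (cs : List Char) : Option (List (List Char)) :=
  if cs = [] then some []
  else if cs.take 3 = ['a','y','a'] then (pvTokB (cs.drop 3)).map (['a','y','a'] :: ·)
  else if cs.take 2 = ['y','e'] then (pvTokB (cs.drop 2)).map (['y','e'] :: ·)
  else if cs.take 3 = ['w','o','o'] then (pvTokB (cs.drop 3)).map (['w','o','o'] :: ·)
  else if cs.take 2 = ['m','a'] then (pvTokB (cs.drop 2)).map (['m','a'] :: ·)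
  else none
termination_by cs.length
decreasing_by all_goals (cases cs <;> simp_all)

-- all(x != y for x, y in zip(tokens, tokens[1:]))
def pvNoAdj (ts : List (List Char)) : Bool :=
  (ts.zip (ts.drop 1)).all (fun p => !(p.1 == p.2))

def pvValidB (b : String) : Bool :=
  match pvTokB b.toList with
  | some ts => pvNoAdj ts
  | none => false

def solution_alt (babbling : List String) : Int :=
  babbling.foldl (fun n b => if pvValidB b then n + 1 else n) 0

-- ===== PRECONDITION & SPEC =====
def Spec_solution (babbling : List String) (out : Int) : Prop := out = solution_alt babbling
instance (babbling : List String) (out : Int) : Decidable (Spec_solution babbling out) := by unfold Spec_solution; infer_instance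

-- ===== CLAIM (what is proved, stated in full; the proofs are below) =====
def Claim_equal_solution : Prop := ∀ (babbling : List String), Dom_solution babbling → Spec_solution babbling (solution babbling)

-- ===== LEMMAS AND PROOFS =====

-- take k cs = w forces cs to start with w
theorem pvTakeEq {α : Type} (cs : List α) (k : Nat) (w : List α) (h : cs.take k = w) :
    cs.take w.length = w := by
  have hlen : (cs.take k).length = w.length := by rw [h]
  simp [List.length_take] at hlen
  have hk : w.length ≤ k := by omega
  have : cs.take w.length = (cs.take k).take w.length := by
    rw [List.take_take, min_eq_left hk]
  rw [this, h, List.take_length]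

-- when no branch of B's tokenizer matches, no prefix of cs is a word
theorem pvNoPrefix (cs : List Char)
    (h1 : ¬ cs.take 3 = ['a','y','a']) (h2 : ¬ cs.take 2 = ['y','e'])
    (h3 : ¬ cs.take 3 = ['w','o','o']) (h4 : ¬ cs.take 2 = ['m','a']) :
    ∀ k : Nat, ([] : List Char) ++ cs.take k ∉ pvWordsA := by
  intro k hk
  simp only [List.nil_append, pvWordsA, List.mem_cons, List.not_mem_nil, or_false] at hk
  rcases hk with h | h | h | h
  · exact h1 (pvTakeEq cs k _ h)
  · exact h2 (pvTakeEq cs k _ h)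
  · exact h3 (pvTakeEq cs k _ h)
  · exact h4 (pvTakeEq cs k _ h)

-- A's loop never matches while no extension of the pending word is a word
theorem pvFoldA_noMatch (cs : List Char) (acc : List (List Char)) (w : List Char)
    (h : ∀ k : Nat, (w ++ cs.take k) ∉ pvWordsA) :
    cs.foldl pvStepA (acc, w) = (acc, w ++ cs) := by
  induction cs generalizing w with
  | nil => simp
  | cons c cs ih =>
    have h1 : (w ++ [c]) ∉ pvWordsA := by simpa using h 1
    have hstep : List.foldl pvStepA (acc, w) (c :: cs) = List.foldl pvStepA (acc, w ++ [c]) cs := by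
      simp [pvStepA, h1]
    rw [hstep, ih (w ++ [c]) (fun k => by simpa using h (k+1))]
    simp

-- consuming each word from a reset state
theorem pvFoldA_aya (acc : List (List Char)) (r : List Char) :
    (['a','y','a'] ++ r).foldl pvStepA (acc, []) = r.foldl pvStepA (acc ++ [['a','y','a']], []) := by
  simp [pvStepA, pvWordsA]

theorem pvFoldA_ye (acc : List (List Char)) (r : List Char) :
    (['y','e'] ++ r).foldl pvStepA (acc, []) = r.foldl pvStepA (acc ++ [['y','e']], []) := by
  simp [pvStepA, pvWordsA]

theorem pvFoldA_woo (acc : List (List Char)) (r : List Char) :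
    (['w','o','o'] ++ r).foldl pvStepA (acc, []) = r.foldl pvStepA (acc ++ [['w','o','o']], []) := by
  simp [pvStepA, pvWordsA]

theorem pvFoldA_ma (acc : List (List Char)) (r : List Char) :
    (['m','a'] ++ r).foldl pvStepA (acc, []) = r.foldl pvStepA (acc ++ [['m','a']], []) := by
  simp [pvStepA, pvWordsA]

-- if B tokenizes fully, A's loop consumes everything into the same tokens
theorem pvFoldA_some (cs : List Char) :
    ∀ (acc : List (List Char)) (ts : List (List Char)), pvTokB cs = some ts →
    cs.foldl pvStepA (acc, []) = (acc ++ ts, []) := by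
  induction cs using pvTokB.induct with
  | case1 => intro acc ts h; rw [pvTokB] at h; simp at h; simp [← h]
  | case2 cs hne h3 ih =>
    intro acc ts h
    rw [pvTokB] at h
    simp [hne, h3] at h
    obtain ⟨ts', hts', rfl⟩ := h
    rw [← List.take_append_drop 3 cs, h3, pvFoldA_aya, ih _ _ hts']
    simp
  | case3 cs hne hn1 h2 ih =>
    intro acc ts h
    rw [pvTokB] at h
    simp [hne, hn1, h2] at h
    obtain ⟨ts', hts', rfl⟩ := h
    rw [← List.take_append_drop 2 cs, h2, pvFoldA_ye, ih _ _ hts']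
    simp
  | case4 cs hne hn1 hn2 h3 ih =>
    intro acc ts h
    rw [pvTokB] at h
    simp [hne, hn2, h3] at h
    obtain ⟨ts', hts', rfl⟩ := h
    rw [← List.take_append_drop 3 cs, h3, pvFoldA_woo, ih _ _ hts']
    simp
  | case5 cs hne hn1 hn2 hn3 h2 ih =>
    intro acc ts h
    rw [pvTokB] at h
    simp [hne, hn1, hn3, h2] at h
    obtain ⟨ts', hts', rfl⟩ := h
    rw [← List.take_append_drop 2 cs, h2, pvFoldA_ma, ih _ _ hts']
    simp
  | case6 cs hne hn1 hn2 hn3 hn4 =>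
    intro acc ts h
    rw [pvTokB] at h
    simp [hne, hn1, hn2, hn3, hn4] at h

-- if B fails to tokenize, A's loop leaves a nonempty word
theorem pvFoldA_none (cs : List Char) :
    ∀ (acc : List (List Char)), pvTokB cs = none →
    (cs.foldl pvStepA (acc, [])).2 ≠ [] := by
  induction cs using pvTokB.induct with
  | case1 => intro acc h; rw [pvTokB] at h; simp at h
  | case2 cs hne h3 ih =>
    intro acc h
    rw [pvTokB] at h
    simp [hne, h3] at h
    rw [← List.take_append_drop 3 cs, h3, pvFoldA_aya]
    exact ih _ h
  | case3 cs hne hn1 h2 ih =>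
    intro acc h
    rw [pvTokB] at h
    simp [hne, hn1, h2] at h
    rw [← List.take_append_drop 2 cs, h2, pvFoldA_ye]
    exact ih _ h
  | case4 cs hne hn1 hn2 h3 ih =>
    intro acc h
    rw [pvTokB] at h
    simp [hne, hn2, h3] at h
    rw [← List.take_append_drop 3 cs, h3, pvFoldA_woo]
    exact ih _ h
  | case5 cs hne hn1 hn2 hn3 h2 ih =>
    intro acc h
    rw [pvTokB] at h
    simp [hne, hn1, hn3, h2] at h
    rw [← List.take_append_drop 2 cs, h2, pvFoldA_ma]
    exact ih _ h
  | case6 cs hne hn1 hn2 hn3 hn4 =>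
    intro acc h
    rw [pvFoldA_noMatch cs acc [] (pvNoPrefix cs hn1 hn2 hn3 hn4)]
    simpa using hne

-- A's flag loop collapses to an any-check
theorem pvFlagFold (l : List Int) (C : Int → Prop) [DecidablePred C] (w0 : List Char) :
    l.foldl (fun w i => if C i then ['a'] else w) w0
      = if l.any (fun i => decide (C i)) then ['a'] else w0 := by
  induction l generalizing w0 with
  | nil => simp
  | cons i l ih =>
    by_cases h : C i
    · simp [h, ih]
    · simp only [List.foldl_cons, List.any_cons, if_neg h]
      rw [ih]
      simp [h]

-- B's zip-based check is IsChain (≠)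
theorem pvNoAdj_iff (ts : List (List Char)) : pvNoAdj ts = true ↔ List.IsChain (· ≠ ·) ts := by
  induction ts with
  | nil => simp [pvNoAdj]
  | cons x ts ih =>
    cases ts with
    | nil => simp [pvNoAdj]
    | cons y l =>
      simp [pvNoAdj, List.isChain_cons_cons] at ih ⊢
      tauto

-- A's index-range duplicate check is ¬ IsChain (≠)
theorem pvAnyDup_iff (ts : List (List Char)) :
    ((PySem.List.pyRange 1 (ts.length : Int) 1).any
      (fun i => decide (PySem.List.pyGetD ts (i-1) [] = PySem.List.pyGetD ts i [])) = true)
      ↔ ¬ List.IsChain (· ≠ ·) ts := by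
  rw [List.any_eq_true]
  constructor
  · rintro ⟨i, hmem, hC⟩ hch
    rw [PySem.List.mem_pyRange_one] at hmem
    obtain ⟨h1, h2⟩ := hmem
    simp only [decide_eq_true_iff] at hC
    rw [PySem.List.pyGetD_eq_getElem _ _ (by omega) (by omega),
        PySem.List.pyGetD_eq_getElem _ _ (by omega) (by omega)] at hC
    have hj : (i-1).toNat + 1 < ts.length := by omega
    have := hch.getElem ((i-1).toNat) hj
    apply this
    rw [hC]
    congr 1
    omega
  · intro hch
    by_contra hall
    simp only [not_exists, not_and] at hall
    apply hch
    rw [List.isChain_iff_getElem]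
    intro j hj heq
    have hmem : ((j:Int)+1) ∈ PySem.List.pyRange 1 (ts.length : Int) 1 := by
      rw [PySem.List.mem_pyRange_one]
      constructor <;> [omega; exact_mod_cast by omega]
    apply hall _ hmem
    rw [decide_eq_true_iff]
    have e0 : ((j:Int) + 1 - 1) = (j:Int) := by ring
    rw [e0, PySem.List.pyGetD_eq_getElem _ _ (by omega) (by omega),
        PySem.List.pyGetD_eq_getElem _ _ (by omega) (by omega)]
    have e1 : ((j:Int)).toNat = j := by omega
    have e2 : ((j:Int) + 1).toNat = j + 1 := by omega
    simp only [e1, e2]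
    exact heq

-- per-string equivalence of the accept conditions
theorem pvAccept_eq (b : String) :
    ((let st := b.toList.foldl pvStepA ([], [])
      (PySem.List.pyRange 1 (st.1.length : Int) 1).foldl
        (fun w i => if PySem.List.pyGetD st.1 (i-1) [] = PySem.List.pyGetD st.1 i [] then ['a'] else w)
        st.2) = []) ↔ pvValidB b = true := by
  unfold pvValidB
  cases h : pvTokB b.toList with
  | none =>
    have hne := pvFoldA_none b.toList [] h
    simp only []
    rw [pvFlagFold]
    constructor
    · intro hw
      exfalso
      revert hw
      split
      · simp
      · exact hne
    · simp
  | some ts =>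
    have hst := pvFoldA_some b.toList [] ts h
    simp only [List.nil_append] at hst
    simp only [hst]
    rw [pvFlagFold]
    by_cases hc : List.IsChain (fun x1 x2 : List Char => x1 ≠ x2) ts
    · rw [if_neg (fun hA => (pvAnyDup_iff ts).mp hA hc)]
      simp [pvNoAdj_iff, hc]
    · rw [if_pos ((pvAnyDup_iff ts).mpr hc)]
      simp [pvNoAdj_iff, hc]

-- both folds agree from any accumulator
theorem pvFold_eq (l : List String) (n : Int) :
    l.foldl (fun answer babble =>
      let st := babble.toList.foldl pvStepA ([], [])
      let word := (PySem.List.pyRange 1 (st.1.length : Int) 1).foldl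
        (fun w i => if PySem.List.pyGetD st.1 (i-1) [] = PySem.List.pyGetD st.1 i [] then ['a'] else w)
        st.2
      if word = [] then answer + 1 else answer) n
    = l.foldl (fun n b => if pvValidB b then n + 1 else n) n := by
  induction l generalizing n with
  | nil => rfl
  | cons b l ih =>
    simp only [List.foldl_cons]
    rw [ih]
    congr 1
    by_cases hv : pvValidB b = true
    · rw [if_pos ((pvAccept_eq b).mpr hv), if_pos hv]
    · rw [if_neg (fun hc => hv ((pvAccept_eq b).mp hc)), if_neg hv]

-- ===== VERDICT (by name: the statement is the Claim_ definition above) =====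
theorem solution_spec : Claim_equal_solution := by
  intro babbling _
  unfold Spec_solution solution solution_alt
  exact pvFold_eq babbling 0
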